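-- pv_equiv track=rewrite | github.com/TripsJ/Py-Warmup | Text_Analysis/text_analysis.py | analyse_text
-- ===== SOURCE A (Python) =====
-- def analyse_text(text):
--    words = 0
--    letters  = 0
--    symbols = 0
--    sentences = 0
--    sentence_ends = [".","!","?"]
--    store = {}
--    if text[-1] in sentence_ends:
--        words += 1
--    for element in text:
--        if element in store:
--            store[element]+=1
--        else:
--            store[element] = 1
--        if element in sentence_ends:
--            sentences +=1
--        elif element == " ":
--            words += 1
--        if element.isalpha():
--            letters += 1
--        else:
--            symbols += 1
--    store["letters"] = letters
--    store["symbols"] = symbols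
--    store["sentences"] = sentences
--
--    return store
-- ===== SOURCE B (Python) =====
-- def analyse_text(text):
--     store = {}
--     for element in text:
--         store[element] = store.get(element, 0) + 1
--     letters = sum(v for k, v in store.items() if k.isalpha())
--     store["letters"] = letters
--     store["symbols"] = len(text) - letters
--     store["sentences"] = store.get(".", 0) + store.get("!", 0) + store.get("?", 0)
--     return store
-- ===== Notes on version B (the rewrite author's own statement) =====
-- stated objective: alternative
-- what changed: B builds the character-frequency dict first and then derives letters (sum of counts over distinct alpha keys), symbols (len(text) - letters) and sentences (table lookups for '.', '!', '?') from that table in separate passes, instead of A's five running counters updated inside one loop; the loop body does one dict update instead of dict update plus membership tests and counter updates, a constant-factor speedup.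
import Mathlib
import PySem

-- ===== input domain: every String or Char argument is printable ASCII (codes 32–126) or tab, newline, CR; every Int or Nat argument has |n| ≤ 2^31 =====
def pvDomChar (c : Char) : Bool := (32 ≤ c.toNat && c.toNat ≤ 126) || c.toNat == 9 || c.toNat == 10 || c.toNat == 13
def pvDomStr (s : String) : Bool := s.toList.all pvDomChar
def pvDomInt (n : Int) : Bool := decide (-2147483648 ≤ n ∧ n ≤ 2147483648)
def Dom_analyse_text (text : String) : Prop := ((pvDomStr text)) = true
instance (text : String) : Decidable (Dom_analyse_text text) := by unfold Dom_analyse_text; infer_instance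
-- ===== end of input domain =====

-- B builds the character-frequency dict first and derives letters/symbols/sentences
-- from that table afterwards, instead of A's five running counters in one loop
-- (alternative decomposition of the same O(n) task).

-- ===== PORT A =====
-- a Python character is a 1-character string
def pvKey (c : Char) : String := String.ofList [c]

def analyse_text (text : String) : List (String × Int) :=
  let sentence_ends : List String := [".", "!", "?"]
  -- text[-1] raises IndexError on empty text (excluded by Pre_); `none => []` is unreachable under Pre_
  match PySem.Str.pyGet? text (-1) with
  | none => []
  | some lastC =>
    let words0 : Int := if pvKey lastC ∈ sentence_ends then 1 else 0
    let r := text.toList.foldl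
      (fun (st : PySem.Dict String Int × Int × Int × Int × Int) c =>
        let (store, words, letters, symbols, sentences) := st
        let element := pvKey c
        let store := if store.contains element then
            store.insert element (store.getD element 0 + 1)
          else store.insert element 1
        let sentences := if element ∈ sentence_ends then sentences + 1 else sentences
        let words := if element ∈ sentence_ends then words
          else if element = " " then words + 1 else words
        let letters := if PySem.Str.strIsalpha element then letters + 1 else letters
        let symbols := if PySem.Str.strIsalpha element then symbols else symbols + 1
        (store, words, letters, symbols, sentences))
      (PySem.Dict.empty, words0, 0, 0, 0)
    ((((r.1.insert "letters" r.2.2.1).insert "symbols" r.2.2.2.1).insert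
        "sentences" r.2.2.2.2)).items

-- ===== PORT B =====
def analyse_text_alt (text : String) : List (String × Int) :=
  let store := text.toList.foldl
    (fun (d : PySem.Dict String Int) c =>
      let element := pvKey c
      d.insert element (d.getD element 0 + 1)) PySem.Dict.empty
  let letters := (store.items.filter (fun kv => PySem.Str.strIsalpha kv.1)).foldl
    (fun acc kv => acc + kv.2) 0
  let store := store.insert "letters" letters
  let store := store.insert "symbols" (PySem.Str.len text - letters)
  let store := store.insert "sentences"
    (store.getD "." 0 + store.getD "!" 0 + store.getD "?" 0)
  store.items

-- ===== PRECONDITION & SPEC =====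
-- A evaluates text[-1] and raises IndexError on the empty string; that input is excluded.
def Pre_analyse_text (text : String) : Prop := text ≠ ""
instance (text : String) : Decidable (Pre_analyse_text text) := by unfold Pre_analyse_text; infer_instance
def pvWitness_analyse_text : String := "Hi there."

def Spec_analyse_text (text : String) (out : List (String × Int)) : Prop := out = analyse_text_alt text
instance (text : String) (out : List (String × Int)) : Decidable (Spec_analyse_text text out) := by unfold Spec_analyse_text; infer_instance

-- ===== CLAIM (what is proved, stated in full; the proofs are below) =====
def Claim_equal_analyse_text : Prop := ∀ (text : String), Dom_analyse_text text → Pre_analyse_text text → Spec_analyse_text text (analyse_text text)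

-- ===== LEMMAS AND PROOFS =====

-- per-character predicates used to characterise A's running counters
def pvIsAlpha (c : Char) : Bool := PySem.Str.strIsalpha (pvKey c)
def pvIsEnd (c : Char) : Bool := decide (pvKey c ∈ ([".", "!", "?"] : List String))

-- A's per-step dict update is the unconditional counting insert
lemma pv_store_step (d : PySem.Dict String Int) (k : String) :
    (if d.contains k then d.insert k (d.getD k 0 + 1) else d.insert k 1)
      = d.insert k (d.getD k 0 + 1) := by
  by_cases h : d.contains k = true
  · simp [h]
  · have h' : d.contains k = false := by simpa using h
    rw [if_neg h, PySem.Dict.getD_of_not_contains _ _ h']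
    norm_num

-- characterisation of A's fold: the dict is the counting fold, and the three
-- stored counters are countP's over the characters
lemma pv_aFold (cs : List Char) (d : PySem.Dict String Int) (w l s n : Int) :
    ∃ w', cs.foldl
      (fun (st : PySem.Dict String Int × Int × Int × Int × Int) c =>
        let (store, words, letters, symbols, sentences) := st
        let element := pvKey c
        let store := if store.contains element then
            store.insert element (store.getD element 0 + 1)
          else store.insert element 1
        let sentences := if element ∈ ([".", "!", "?"] : List String) then sentences + 1 else sentences
        let words := if element ∈ ([".", "!", "?"] : List String) then words
          else if element = " " then words + 1 else words
        let letters := if PySem.Str.strIsalpha element then letters + 1 else letters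
        let symbols := if PySem.Str.strIsalpha element then symbols else symbols + 1
        (store, words, letters, symbols, sentences)) (d, w, l, s, n)
      = (cs.foldl (fun d c => d.insert (pvKey c) (d.getD (pvKey c) 0 + 1)) d,
         w',
         l + (cs.countP pvIsAlpha : Int),
         s + (cs.countP (fun c => ! pvIsAlpha c) : Int),
         n + (cs.countP pvIsEnd : Int)) := by
  induction cs generalizing d w l s n with
  | nil => exact ⟨w, by simp⟩
  | cons c cs ih =>
    simp only [List.foldl_cons]
    obtain ⟨w', hw⟩ := ih
      (if d.contains (pvKey c) then d.insert (pvKey c) (d.getD (pvKey c) 0 + 1) else d.insert (pvKey c) 1)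
      (if pvKey c ∈ ([".", "!", "?"] : List String) then w else if pvKey c = " " then w + 1 else w)
      (if PySem.Str.strIsalpha (pvKey c) then l + 1 else l)
      (if PySem.Str.strIsalpha (pvKey c) then s else s + 1)
      (if pvKey c ∈ ([".", "!", "?"] : List String) then n + 1 else n)
    refine ⟨w', ?_⟩
    rw [hw, pv_store_step]
    simp only [Prod.mk.injEq, List.countP_cons, pvIsAlpha, pvIsEnd, decide_eq_true_eq]
    refine ⟨trivial, trivial, ?_, ?_, ?_⟩ <;> split_ifs <;> simp_all <;> omega

-- membership in the three sentence ends, as a sum of counts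
lemma pv_count_ends (ks : List String) :
    (ks.countP (fun k => decide (k ∈ ([".", "!", "?"] : List String))) : Int)
      = (ks.count "." : Int) + ks.count "!" + ks.count "?" := by
  induction ks with
  | nil => simp
  | cons k ks ih =>
    simp only [List.countP_cons, List.count_cons]
    by_cases h1 : k = "." <;> by_cases h2 : k = "!" <;> by_cases h3 : k = "?" <;>
      simp_all <;> omega

-- sum of the table's counts over the distinct keys satisfying p = countP p
lemma pv_sum_counts (ks : List String) (p : String → Bool) :
    ((((PySem.Set.ofList ks).filter p).map (fun k => (ks.count k : Int))).sum)
      = (ks.countP p : Int) := by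
  have hperm : (List.dedup ks).Perm (PySem.Set.ofList ks) := by
    rw [List.perm_ext_iff_of_nodup (List.nodup_dedup ks) (PySem.Set.nodup_ofList ks)]
    intro a
    simp [List.mem_dedup, PySem.Set.mem_ofList]
  have h1 : ((((PySem.Set.ofList ks).filter p).map (fun k => (ks.count k : Int))).sum)
      = ((((List.dedup ks).filter p).map (fun k => (ks.count k : Int))).sum) :=
    (((hperm.filter p).map _).sum_eq).symm
  rw [h1]
  have h2 : (((List.dedup ks).filter p).map (fun k => (ks.count k : Int)))
      = (((List.dedup ks).filter p).map (fun k => ks.count k)).map (Nat.cast : Nat → Int) := by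
    simp [List.map_map, Function.comp]
  rw [h2, ← Nat.cast_list_sum, List.sum_map_count_dedup_filter_eq_countP p ks]

-- the countP of the complement is length minus countP
lemma pv_countP_not (cs : List Char) :
    (cs.countP (fun c => ! pvIsAlpha c) : Int) = (cs.length : Int) - cs.countP pvIsAlpha := by
  have h := List.length_eq_countP_add_countP (p := pvIsAlpha) (l := cs)
  have h2 : cs.countP (fun c => ! pvIsAlpha c)
      = cs.countP (fun a => decide ¬ pvIsAlpha a = true) :=
    List.countP_congr (fun a _ => by cases pvIsAlpha a <;> simp)
  omega

theorem analyse_text_spec : Claim_equal_analyse_text := by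
  intro text _ hpre
  have hne : text.toList ≠ [] := by
    intro h
    exact hpre (String.toList_eq_nil_iff.mp h)
  obtain ⟨lastC, hlast⟩ := Option.isSome_iff_exists.mp
    (show (PySem.Str.pyGet? text (-1)).isSome by
      rw [PySem.Str.pyGet?_eq, PySem.Chars.pyGet?_eq_listPyGet?, PySem.List.pyGet?_neg_one]
      exact List.getLast?_isSome.mpr hne)
  simp only [Spec_analyse_text, analyse_text, analyse_text_alt, hlast]
  obtain ⟨w', hfold⟩ := pv_aFold text.toList PySem.Dict.empty
    (if pvKey lastC ∈ ([".", "!", "?"] : List String) then 1 else 0) 0 0 0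
  rw [hfold]
  have hstore : text.toList.foldl (fun d c => d.insert (pvKey c) (d.getD (pvKey c) 0 + 1))
      PySem.Dict.empty
      = PySem.Dict.counter (text.toList.map pvKey) := by
    rw [← PySem.Dict.foldl_insert_getD_add_one_eq_counter, List.foldl_map]
  set ks := text.toList.map pvKey with hks
  simp only [zero_add]
  rw [hstore]
  have hletters : (((PySem.Dict.counter ks).items.filter
        (fun kv => PySem.Str.strIsalpha kv.1)).foldl (fun acc kv => acc + kv.2) 0)
      = (text.toList.countP pvIsAlpha : Int) := by
    rw [PySem.List.foldl_add, PySem.Dict.items_counter, List.filter_map]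
    have hf : ((fun kv : String × Int => PySem.Str.strIsalpha kv.1)
        ∘ (fun k => (k, (ks.count k : Int)))) = PySem.Str.strIsalpha := rfl
    rw [hf, List.map_map]
    have hg : ((fun kv : String × Int => kv.2) ∘ (fun k => (k, (ks.count k : Int))))
        = fun k => (ks.count k : Int) := rfl
    rw [hg, pv_sum_counts, hks, List.countP_map, zero_add]
    rfl
  rw [hletters]
  have hget : ∀ (L S : Int) (k : String), k ≠ "symbols" → k ≠ "letters" →
      (((PySem.Dict.counter ks).insert "letters" L).insert "symbols" S).getD k 0
        = (ks.count k : Int) := by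
    intro L S k hk1 hk2
    rw [PySem.Dict.getD_insert, if_neg hk1, PySem.Dict.getD_insert, if_neg hk2,
      PySem.Dict.getD_counter]
  have hsent : ∀ L S : Int,
      (((PySem.Dict.counter ks).insert "letters" L).insert "symbols" S).getD "." 0
        + (((PySem.Dict.counter ks).insert "letters" L).insert "symbols" S).getD "!" 0
        + (((PySem.Dict.counter ks).insert "letters" L).insert "symbols" S).getD "?" 0
      = (text.toList.countP pvIsEnd : Int) := by
    intro L S
    rw [hget L S "." (by decide) (by decide), hget L S "!" (by decide) (by decide),
      hget L S "?" (by decide) (by decide), ← pv_count_ends, hks, List.countP_map]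
    rfl
  rw [hsent]
  have hsym : PySem.Str.len text - (text.toList.countP pvIsAlpha : Int)
      = (text.toList.countP (fun c => ! pvIsAlpha c) : Int) := by
    rw [pv_countP_not, PySem.Str.len_eq]
  rw [hsym]
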